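-- pv_equiv track=rewrite | github.com/pypi-data/pypi-mirror-378 | packages/pnb.mcl/pnb_mcl-0.1.4.tar.gz/pnb_mcl-0.1.4/src/pnb/mcl/io/owl.py | paragraphs
-- ===== SOURCE A (Python) =====
-- def paragraphs(text):
--
--
--     pars = []
--     par_lines = []
--     for line in text.split('\n'):
--         line = line.strip()
--         if line:
--             par_lines.append(line)
--         elif par_lines:
--             pars.append(' '.join(par_lines))
--             par_lines = []
--     if par_lines:
--         pars.append(' '.join(par_lines))
--     return '\n'.join(pars)
-- ===== SOURCE B (Python) =====
-- def paragraphs(text):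
--     def chunks(ls):
--         if '' in ls:
--             i = ls.index('')
--             return [ls[:i]] + chunks(ls[i + 1:])
--         return [ls]
--
--     lines = [ln.strip() for ln in text.split('\n')]
--     return '\n'.join(' '.join(g) for g in chunks(lines) if g)
-- ===== Notes on version B (the rewrite author's own statement) =====
-- stated objective: alternative
-- what changed: Replaces A's single-pass accumulator state machine (pars/par_lines buffers flushed at blank lines) with a divide-and-conquer split: recursively cut the stripped-line list at the first blank line (membership test + index + slicing, like str.split's algorithm), then space-join each nonempty chunk.
import Mathlib
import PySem

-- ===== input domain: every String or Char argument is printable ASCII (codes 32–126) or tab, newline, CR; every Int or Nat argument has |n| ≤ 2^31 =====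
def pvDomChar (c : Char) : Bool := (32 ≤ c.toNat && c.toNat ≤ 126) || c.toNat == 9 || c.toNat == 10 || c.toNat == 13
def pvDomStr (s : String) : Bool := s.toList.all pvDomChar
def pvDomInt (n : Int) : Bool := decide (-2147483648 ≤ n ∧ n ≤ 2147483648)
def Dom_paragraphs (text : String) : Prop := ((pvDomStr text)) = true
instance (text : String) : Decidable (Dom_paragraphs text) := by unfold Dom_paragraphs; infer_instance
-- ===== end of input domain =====

-- B replaces A's accumulator state machine (buffers flushed at blank lines) by a
-- divide-and-conquer split: cut the stripped-line list at the first blank line and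
-- recurse on the remainder; same cost, a different decomposition.

-- ===== PORT A =====
-- A: loop over lines keeping (pars, par_lines), flushing the buffer at blank lines and at the end.
def paragraphs (text : String) : String :=
  let st := ((PySem.Str.split? text "\n").getD []).foldl
    (fun (st : List String × List String) line =>
      let l := PySem.Str.strip line
      if l ≠ "" then (st.1, st.2 ++ [l])
      else if st.2 ≠ [] then (st.1 ++ [PySem.Str.join " " st.2], [])
      else st) ([], [])
  PySem.Str.join "\n"
    (if st.2 ≠ [] then st.1 ++ [PySem.Str.join " " st.2] else st.1)

-- ===== PORT B =====
-- chunks(ls): if '' in ls then slice before its first index and recurse after it, else [ls].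
def pvChunks (ls : List String) : List (List String) :=
  match h : PySem.List.index? ls "" with
  | some i =>
      PySem.List.slice ls none (some (i : Int)) ::
        pvChunks (PySem.List.slice ls (some ((i : Int) + 1)) none)
  | none => [ls]
termination_by ls.length
decreasing_by
  have hi : i < ls.length := by
    obtain ⟨hk, _⟩ := PySem.List.getElem_of_index?_eq_some h
    exact hk
  have hdrop : PySem.List.slice ls (some ((i : Int) + 1)) none = ls.drop (i + 1) := by
    have := PySem.List.slice_from_natCast ls (i + 1)
    simpa using this
  rw [hdrop]
  simp [List.length_drop]
  omega

def paragraphs_alt (text : String) : String :=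
  let lines := ((PySem.Str.split? text "\n").getD []).map PySem.Str.strip
  PySem.Str.join "\n"
    (((pvChunks lines).filter (· ≠ [])).map (PySem.Str.join " "))

-- ===== PRECONDITION & SPEC =====
def Spec_paragraphs (text : String) (out : String) : Prop := out = paragraphs_alt text
instance (text : String) (out : String) : Decidable (Spec_paragraphs text out) := by unfold Spec_paragraphs; infer_instance

-- ===== CLAIM (what is proved, stated in full; the proofs are below) =====
def Claim_equal_paragraphs : Prop := ∀ (text : String), Dom_paragraphs text → Spec_paragraphs text (paragraphs text)

-- ===== LEMMAS AND PROOFS =====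

-- A's loop body on an already-stripped line.
def pvStep (st : List String × List String) (l : String) : List String × List String :=
  if l ≠ "" then (st.1, st.2 ++ [l])
  else if st.2 ≠ [] then (st.1 ++ [PySem.Str.join " " st.2], [])
  else st

-- the maximal runs of non-empty lines, as produced left to right
def pvGroups : List String → List (List String)
  | [] => []
  | l :: ls =>
    if l = "" then pvGroups ls
    else (l :: ls.takeWhile (· ≠ "")) :: pvGroups (ls.dropWhile (· ≠ ""))
termination_by ls => ls.length
decreasing_by
  · simp
  · exact Nat.lt_succ_of_le (List.length_dropWhile_le _ _)

-- groups of `ls` with a pending (already accumulated) buffer `cur`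
def pvGroupsWith (cur : List String) (ls : List String) : List (List String) :=
  if cur = [] then pvGroups ls
  else (cur ++ ls.takeWhile (· ≠ "")) :: pvGroups (ls.dropWhile (· ≠ ""))

theorem pv_key (ls : List String) : ∀ pars cur : List String,
    (if (ls.foldl pvStep (pars, cur)).2 ≠ [] then
        (ls.foldl pvStep (pars, cur)).1 ++ [PySem.Str.join " " (ls.foldl pvStep (pars, cur)).2]
      else (ls.foldl pvStep (pars, cur)).1)
    = pars ++ (pvGroupsWith cur ls).map (PySem.Str.join " ") := by
  induction ls with
  | nil =>
    intro pars cur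
    by_cases h : cur = [] <;> simp [pvGroupsWith, h, pvGroups]
  | cons l ls ih =>
    intro pars cur
    by_cases hl : l = ""
    · subst hl
      by_cases hc : cur = []
      · subst hc
        have hg : pvGroups ("" :: ls) = pvGroups ls := by rw [pvGroups]; simp
        simpa [pvGroupsWith, pvStep, List.foldl_cons, hg] using ih pars []
      · rw [List.foldl_cons, show pvStep (pars, cur) "" = (pars ++ [PySem.Str.join " " cur], []) by
            simp [pvStep, hc]]
        rw [ih (pars ++ [PySem.Str.join " " cur]) []]
        simp [pvGroupsWith, hc, pvGroups]
    · rw [List.foldl_cons, show pvStep (pars, cur) l = (pars, cur ++ [l]) by simp [pvStep, hl]]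
      rw [ih pars (cur ++ [l])]
      by_cases hc : cur = []
      · subst hc
        simp [pvGroupsWith, hl, pvGroups]
      · simp [pvGroupsWith, hc, hl]

-- B's split-at-first-blank recursion yields exactly the non-empty runs
theorem pv_chunks_filter (ls : List String) :
    (pvChunks ls).filter (· ≠ []) = pvGroups ls := by
  induction hls : ls.length using Nat.strong_induction_on generalizing ls with
  | _ n ih =>
  rw [pvChunks]
  split
  case h_2 h =>
    have hmem : "" ∉ ls := (PySem.List.index?_eq_none_iff ls "").mp h
    cases ls with
    | nil => simp [pvGroups]
    | cons l t =>
      have hl : l ≠ "" := by intro e; exact hmem (by simp [e])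
      have ht : ∀ x ∈ t, x ≠ "" := by
        intro x hx e; exact hmem (List.mem_cons_of_mem _ (e ▸ hx))
      rw [pvGroups]
      rw [List.takeWhile_eq_self_iff.mpr (by intro x hx; simpa using ht x hx)]
      rw [List.dropWhile_eq_nil_iff.mpr (by intro x hx; simpa using ht x hx)]
      simp [hl, pvGroups]
  case h_1 i h =>
    obtain ⟨pre, suf, hdec, hlen, hpre⟩ := ((PySem.List.index?_eq_some_iff ls "" i).mp h)
    have htake : PySem.List.slice ls none (some (i : Int)) = pre := by
      have := PySem.List.slice_to_natCast ls i
      rw [this, hdec, ← hlen, List.take_append]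
      simp
    have hdrop : PySem.List.slice ls (some ((i : Int) + 1)) none = suf := by
      have := PySem.List.slice_from_natCast ls (i + 1)
      rw [show ((i : Int) + 1) = ((i + 1 : Nat) : Int) by push_cast; ring, this, hdec, ← hlen]
      rw [show pre.length + 1 = pre.length + 1 from rfl, List.drop_append]
      simp
    have hsuflen : suf.length < n := by
      subst hls; rw [hdec]; simp; omega
    have ihsuf := ih suf.length hsuflen suf rfl
    rw [htake, hdrop]
    -- pvGroups on ls = pre ++ "" :: suf : pre is one complete run (or nothing)
    have hgroups : pvGroups ls = (if pre = [] then [] else [pre]) ++ pvGroups suf := by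
      rw [hdec]
      clear hdec htake hdrop hlen h hls hsuflen ihsuf
      induction pre with
      | nil =>
        rw [show ([] ++ "" :: suf : List String) = "" :: suf from rfl, pvGroups]
        simp
      | cons p ps _ =>
        have hp : p ≠ "" := by intro e; exact hpre (by simp [e])
        have hps : ∀ x ∈ ps, x ≠ "" := by
          intro x hx e; exact hpre (List.mem_cons_of_mem _ (e ▸ hx))
        rw [show ((p :: ps) ++ "" :: suf : List String) = p :: (ps ++ "" :: suf) from rfl,
          pvGroups]
        have htw : (ps ++ "" :: suf).takeWhile (· ≠ "") = ps := by
          rw [List.takeWhile_append]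
          rw [List.takeWhile_eq_self_iff.mpr (by intro x hx; simpa using hps x hx)]
          simp
        have hdw : (ps ++ "" :: suf).dropWhile (· ≠ "") = "" :: suf := by
          rw [List.dropWhile_append]
          rw [List.dropWhile_eq_nil_iff.mpr (by intro x hx; simpa using hps x hx)]
          simp
        have hgs : pvGroups ("" :: suf) = pvGroups suf := by rw [pvGroups]; simp
        rw [if_neg hp, if_neg (by simp : ¬(p :: ps = []))]
        rw [htw, hdw, hgs]
        simp
    rw [hgroups]
    by_cases hc : pre = []
    · subst hc; simpa using ihsuf
    · simp [hc]
      simpa using ihsuf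

-- ===== VERDICT (by name: the statement is the Claim_ definition above) =====
theorem paragraphs_spec : Claim_equal_paragraphs := by
  intro text _
  unfold Spec_paragraphs paragraphs paragraphs_alt
  have hmap : ((PySem.Str.split? text "\n").getD []).foldl
      (fun (st : List String × List String) line =>
        let l := PySem.Str.strip line
        if l ≠ "" then (st.1, st.2 ++ [l])
        else if st.2 ≠ [] then (st.1 ++ [PySem.Str.join " " st.2], [])
        else st) ([], [])
      = (((PySem.Str.split? text "\n").getD []).map PySem.Str.strip).foldl pvStep ([], []) := by
    rw [List.foldl_map]
    rfl
  simp only [hmap]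
  rw [pv_key (((PySem.Str.split? text "\n").getD []).map PySem.Str.strip) [] []]
  rw [pv_chunks_filter]
  simp [pvGroupsWith]
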